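-- pv_equiv track=rewrite | github.com/MauriceMatthys/Classic-Computer-Science-Algorithms | Python 5 - Lijsten en Tuples/Achterhoede.py | zien
-- ===== SOURCE A (Python) =====
-- def zien(volgorde):
--     volgorde = list(volgorde)
--     red_count = 0
--     for i, hoed in enumerate(volgorde):
--
--         if red_count % 2 == 0:
--             if hoed == "R":
--                 red_count += 1
--             volgorde[i] = "B"
--
--         else:
--             if hoed == "R":
--                 red_count += 1
--             volgorde[i] = "R"
--
--     return tuple(volgorde)
-- ===== SOURCE B (Python) =====
-- def zien(volgorde):
--     v = list(volgorde)
--     n = len(v)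
--     out = []
--     i = 0
--     while True:
--         try:
--             k = v.index("R", i)          # next "R" at or after i
--         except ValueError:
--             out += ["B"] * (n - i)       # no "R" left: rest stays "B"
--             break
--         out += ["B"] * (k + 1 - i)       # run of "B" through this "R" itself
--         try:
--             k2 = v.index("R", k + 1)     # closing "R" of the odd-parity run
--         except ValueError:
--             out += ["R"] * (n - k - 1)   # odd leftover: "R" to the end
--             break
--         out += ["R"] * (k2 - k)          # run of "R" through the closing "R"
--         i = k2 + 1
--     return tuple(out)
-- ===== Notes on version B (the rewrite author's own statement) =====
-- stated objective: alternative
-- what changed: Replaces A's per-element pass with a mutable running red-count by run-length painting: repeatedly find the next two "R" positions with list.index and emit whole runs of "B"s and "R"s between them, with an odd leftover run painted "R" to the end.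
import Mathlib
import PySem

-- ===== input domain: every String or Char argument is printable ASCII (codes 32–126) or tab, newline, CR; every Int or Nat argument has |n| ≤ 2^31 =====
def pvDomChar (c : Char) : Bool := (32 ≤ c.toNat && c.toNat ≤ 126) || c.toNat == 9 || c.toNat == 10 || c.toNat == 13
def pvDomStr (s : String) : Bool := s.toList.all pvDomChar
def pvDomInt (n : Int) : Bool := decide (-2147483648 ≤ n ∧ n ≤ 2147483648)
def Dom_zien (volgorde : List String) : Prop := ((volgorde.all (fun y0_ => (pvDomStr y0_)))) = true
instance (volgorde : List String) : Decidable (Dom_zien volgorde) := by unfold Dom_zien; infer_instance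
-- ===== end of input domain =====

-- B is a different algorithm: instead of A's per-element pass with a running red-count, it paints whole
-- runs between successive "R" positions found with list.index.

-- ===== PORT A =====
-- A's loop over enumerate with red_count: branch on the parity at loop entry, bump the count on "R",
-- assign the slot; the rebuilt list is returned (the tuple(...) return is the List itself here).
def zienGo : Nat → List String → List String
  | _, [] => []
  | c, h :: t =>
      if c % 2 == 0 then
        "B" :: zienGo (if h == "R" then c + 1 else c) t
      else
        "R" :: zienGo (if h == "R" then c + 1 else c) t

def zien (volgorde : List String) : List String := zienGo 0 volgorde

-- ===== PORT B =====
-- v.index("R", i) inside try/except ValueError: none = the exception branch; when "R" occurs in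
-- v[i:], Python returns i + (position of the first "R" in v[i:]), which is exactly i + idxOf on drop i.
def zienFind (v : List String) (i : Nat) : Option Nat :=
  if "R" ∈ v.drop i then some (i + List.idxOf "R" (v.drop i)) else none

-- bounds on a successful find (cited by zienLoop's termination proof)
lemma zienFind_some {v : List String} {i k : Nat} (h : zienFind v i = some k) :
    "R" ∈ v.drop i ∧ k = i + List.idxOf "R" (v.drop i) ∧ i ≤ k ∧ k < v.length := by
  unfold zienFind at h
  split at h
  · rename_i hm
    have hlt := List.idxOf_lt_length_of_mem hm
    have hld : (v.drop i).length = v.length - i := List.length_drop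
    simp only [Option.some.injEq] at h
    exact ⟨hm, by omega, by omega, by omega⟩
  · simp at h

-- the while-loop of Source B: each iteration finds the next two "R"s and emits three kinds of runs
def zienLoop (v : List String) (n i : Nat) : List String :=
  match h1 : zienFind v i with
  | none => List.replicate (n - i) "B"
  | some k =>
    match h2 : zienFind v (k + 1) with
    | none => List.replicate (k + 1 - i) "B" ++ List.replicate (n - k - 1) "R"
    | some k2 =>
        List.replicate (k + 1 - i) "B" ++
          (List.replicate (k2 - k) "R" ++ zienLoop v n (k2 + 1))
termination_by v.length - i
decreasing_by
  have hk := zienFind_some h1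
  have hk2 := zienFind_some h2
  omega

def zien_alt (volgorde : List String) : List String :=
  zienLoop volgorde volgorde.length 0

-- ===== PRECONDITION & SPEC =====
def Spec_zien (volgorde : List String) (out : List String) : Prop := out = zien_alt volgorde
instance (volgorde : List String) (out : List String) : Decidable (Spec_zien volgorde out) := by unfold Spec_zien; infer_instance

-- ===== CLAIM (what is proved, stated in full; the proofs are below) =====
def Claim_equal_zien : Prop := ∀ (volgorde : List String), Dom_zien volgorde → Spec_zien volgorde (zien volgorde)

-- ===== LEMMAS AND PROOFS =====

lemma zienFind_none {v : List String} {i : Nat} (h : zienFind v i = none) :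
    "R" ∉ v.drop i := by
  unfold zienFind at h
  split at h
  · simp at h
  · rename_i hm; exact hm


-- zienGo only depends on the parity of the counter
lemma zienGo_parity (t : List String) : ∀ c c', c % 2 = c' % 2 → zienGo c t = zienGo c' t := by
  induction t with
  | nil => intro c c' _; rfl
  | cons h t ih =>
    intro c c' hp
    have hrec : (if h == "R" then c + 1 else c) % 2 = (if h == "R" then c' + 1 else c') % 2 := by
      by_cases hh : h = "R" <;> simp [hh] <;> omega
    by_cases hc : c % 2 = 0
    · have hc' : c' % 2 = 0 := by omega
      have e1 : zienGo c (h :: t) = "B" :: zienGo (if h == "R" then c + 1 else c) t := by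
        simp [zienGo, hc]
      have e2 : zienGo c' (h :: t) = "B" :: zienGo (if h == "R" then c' + 1 else c') t := by
        simp [zienGo, hc']
      rw [e1, e2, ih _ _ hrec]
    · have h1 : c % 2 = 1 := by omega
      have h1' : c' % 2 = 1 := by omega
      have e1 : zienGo c (h :: t) = "R" :: zienGo (if h == "R" then c + 1 else c) t := by
        simp [zienGo, h1]
      have e2 : zienGo c' (h :: t) = "R" :: zienGo (if h == "R" then c' + 1 else c') t := by
        simp [zienGo, h1']
      rw [e1, e2, ih _ _ hrec]

-- on a stretch without "R" the counter never moves: a constant run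
lemma zienGo_no_R (t : List String) : ∀ c, "R" ∉ t →
    zienGo c t = List.replicate t.length (if c % 2 == 0 then "B" else "R") := by
  induction t with
  | nil => intro c _; rfl
  | cons h t ih =>
    intro c hmem
    have hh : ¬(h = "R") := fun e => hmem (by simp [e])
    have hm : "R" ∉ t := fun m => hmem (List.mem_cons_of_mem _ m)
    by_cases hc : c % 2 = 0
    · simp [zienGo, hc, hh, ih c hm, List.replicate_succ]
    · have h1 : c % 2 = 1 := by omega
      simp [zienGo, h1, hh, ih c hm, List.replicate_succ]

-- crossing the first "R": one constant run through it, then the counter flips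
lemma zienGo_split (ys : List String) : ∀ zs c, "R" ∉ ys →
    zienGo c (ys ++ "R" :: zs)
      = List.replicate (ys.length + 1) (if c % 2 == 0 then "B" else "R") ++ zienGo (c + 1) zs := by
  induction ys with
  | nil =>
    intro zs c _
    by_cases hc : c % 2 = 0
    · simp [zienGo, hc, List.replicate_succ]
    · have h1 : c % 2 = 1 := by omega
      simp [zienGo, h1, List.replicate_succ]
  | cons h ys ih =>
    intro zs c hmem
    have hh : ¬(h = "R") := fun e => hmem (by simp [e])
    have hm : "R" ∉ ys := fun m => hmem (List.mem_cons_of_mem _ m)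
    by_cases hc : c % 2 = 0
    · simp [zienGo, hc, hh, ih zs c hm, List.replicate_succ]
    · have h1 : c % 2 = 1 := by omega
      simp [zienGo, h1, hh, ih zs c hm, List.replicate_succ]

-- a list splits at the first "R" (position idxOf)
lemma split_at_idxOf (l : List String) (h : "R" ∈ l) :
    l = l.take (List.idxOf "R" l) ++ "R" :: l.drop (List.idxOf "R" l + 1) := by
  have hlt : List.idxOf "R" l < l.length := List.idxOf_lt_length_of_mem h
  conv_lhs => rw [← List.take_append_drop (List.idxOf "R" l) l]
  rw [List.drop_eq_getElem_cons hlt, List.getElem_idxOf hlt]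

lemma not_mem_take_idxOf (l : List String) (h : "R" ∈ l) :
    "R" ∉ l.take (List.idxOf "R" l) := by
  rw [List.mem_take_iff_idxOf_lt h]
  omega

-- the loop invariant: from any resume point i the run-painter agrees with A's scan of the suffix
lemma zienLoop_eq (v : List String) : ∀ m i, v.length - i ≤ m →
    zienLoop v v.length i = zienGo 0 (v.drop i) := by
  intro m
  induction m with
  | zero =>
    intro i hi
    have hd : v.drop i = [] := List.drop_eq_nil_of_le (by omega)
    rw [zienLoop]
    split
    · rw [hd]
      simp [zienGo]
      omega
    · rename_i k h1
      have := zienFind_some h1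
      omega
  | succ m ih =>
    intro i hi
    rw [zienLoop]
    split
    · rename_i h1
      have hm := zienFind_none h1
      rw [zienGo_no_R _ 0 hm]
      simp
    · rename_i k h1
      obtain ⟨hm, hk, hik, hkl⟩ := zienFind_some h1
      have hlt : List.idxOf "R" (v.drop i) < (v.drop i).length := List.idxOf_lt_length_of_mem hm
      have hlen : (v.drop i).length = v.length - i := List.length_drop
      have hsplit := split_at_idxOf (v.drop i) hm
      have hdd : (v.drop i).drop (List.idxOf "R" (v.drop i) + 1) = v.drop (k + 1) := by
        rw [List.drop_drop]; congr 1; omega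
      have htlen : ((v.drop i).take (List.idxOf "R" (v.drop i))).length = k - i := by
        rw [List.length_take]; omega
      have hstep : zienGo 0 (v.drop i)
          = List.replicate (k + 1 - i) "B" ++ zienGo 1 (v.drop (k + 1)) := by
        rw [hsplit, zienGo_split _ _ 0 (not_mem_take_idxOf _ hm), hdd, htlen]
        have he : k - i + 1 = k + 1 - i := by omega
        simp [he]
      rw [hstep]
      split
      · rename_i h2
        have hm2 := zienFind_none h2
        rw [zienGo_no_R _ 1 hm2]
        simp [List.length_drop]
        omega
      · rename_i k2 h2
        obtain ⟨hm2, hk2, hik2, hkl2⟩ := zienFind_some h2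
        have hlt2 : List.idxOf "R" (v.drop (k + 1)) < (v.drop (k + 1)).length :=
          List.idxOf_lt_length_of_mem hm2
        have hlen2 : (v.drop (k + 1)).length = v.length - (k + 1) := List.length_drop
        have hsplit2 := split_at_idxOf (v.drop (k + 1)) hm2
        have hdd2 : (v.drop (k + 1)).drop (List.idxOf "R" (v.drop (k + 1)) + 1)
            = v.drop (k2 + 1) := by
          rw [List.drop_drop]; congr 1; omega
        have htlen2 : ((v.drop (k + 1)).take (List.idxOf "R" (v.drop (k + 1)))).length
            = k2 - (k + 1) := by
          rw [List.length_take]; omega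
        have hstep2 : zienGo 1 (v.drop (k + 1))
            = List.replicate (k2 - k) "R" ++ zienGo 2 (v.drop (k2 + 1)) := by
          rw [hsplit2, zienGo_split _ _ 1 (not_mem_take_idxOf _ hm2), hdd2, htlen2]
          have he : k2 - (k + 1) + 1 = k2 - k := by omega
          simp [he]
        rw [hstep2, zienGo_parity _ 2 0 (by omega), ← ih (k2 + 1) (by omega)]

-- ===== VERDICT (by name: the statement is the Claim_ definition above) =====
theorem zien_spec : Claim_equal_zien := by
  intro v _
  show zien v = zien_alt v
  unfold zien zien_alt
  rw [zienLoop_eq v v.length 0 (by omega)]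
  rfl
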